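-- pv_equiv track=rewrite | github.com/davidiach/erdos97 | scripts/test_ear_orderable_higher_n.py | all_distinct_offset_4sets
-- ===== SOURCE A (Python) =====
-- from itertools import combinations, permutations
--
-- def canonical_offset_class(D: tuple[int, ...], n: int) -> tuple[int, ...]:
--     """Canonical representative of D under cyclic-shift action on offsets.
--
--     Two offset 4-sets D, D' give the SAME cyclic Cayley pattern up to cyclic
--     relabelling of vertices iff D' = D + t mod n for some t. We pick the
--     smallest lexicographic shift.
--     """
--     candidates: list[tuple[int, ...]] = []
--     Dset = set(D)
--     for t in range(n):
--         shifted = tuple(sorted((d + t) % n for d in Dset))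
--         candidates.append(shifted)
--     return min(candidates)
--
-- def all_distinct_offset_4sets(n: int) -> list[tuple[int, ...]]:
--     """All sorted 4-subsets of (Z/n) \\ {0}, deduplicated by cyclic-shift."""
--     seen: set[tuple[int, ...]] = set()
--     out: list[tuple[int, ...]] = []
--     for combo in combinations(range(1, n), 4):
--         canon = canonical_offset_class(combo, n)
--         if canon in seen:
--             continue
--         seen.add(canon)
--         out.append(combo)
--     return out
-- ===== SOURCE B (Python) =====
-- from itertools import combinations
--
-- def all_distinct_offset_4sets(n: int) -> list[tuple[int, ...]]:
--     """All sorted 4-subsets of (Z/n) \\ {0}, deduplicated by cyclic-shift.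
--
--     The lexicographically least shift of a 4-set always starts at 0, so the
--     canonical form is the min over just the 4 shifts sending one element to 0
--     (O(1) candidates per combo instead of n)."""
--     reps: dict[tuple[int, ...], tuple[int, ...]] = {}
--     for combo in combinations(range(1, n), 4):
--         canon = min(tuple(sorted((x - d) % n for x in combo)) for d in combo)
--         if canon not in reps:
--             reps[canon] = combo
--     return list(reps.values())
-- ===== Notes on version B (the rewrite author's own statement) =====
-- stated objective: alternative
-- what changed: B canonicalizes each four-subset by minimizing over only the shifts that send one of its elements to zero (since the lexicographically least shift always starts there) instead of trying all n shifts, and dedups with a dict of first representatives returned via values().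
import Mathlib
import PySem

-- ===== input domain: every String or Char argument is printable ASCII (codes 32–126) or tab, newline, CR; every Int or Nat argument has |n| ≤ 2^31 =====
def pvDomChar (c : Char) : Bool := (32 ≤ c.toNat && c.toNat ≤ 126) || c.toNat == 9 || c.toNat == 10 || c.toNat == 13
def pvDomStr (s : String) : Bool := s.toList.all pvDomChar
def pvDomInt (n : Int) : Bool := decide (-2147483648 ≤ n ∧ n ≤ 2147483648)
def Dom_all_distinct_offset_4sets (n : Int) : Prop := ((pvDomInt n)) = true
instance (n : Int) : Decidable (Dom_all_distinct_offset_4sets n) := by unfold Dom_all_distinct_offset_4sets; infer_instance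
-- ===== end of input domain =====

-- B canonicalizes each four-subset via only the shifts that send one of its elements to zero
-- (instead of all n shifts) and dedups with a dict of first representatives (alternative algorithm).


-- shared port of the library call itertools.combinations(range(1, n), 4):
-- lexicographic enumeration = four nested ascending loops (both Pythons call it identically)
def pyCombinations4 (n : Int) : List (List Int) :=
  (PySem.List.pyRange 1 n 1).flatMap fun a =>
    (PySem.List.pyRange (a + 1) n 1).flatMap fun b =>
      (PySem.List.pyRange (b + 1) n 1).flatMap fun c =>
        (PySem.List.pyRange (c + 1) n 1).map fun d => [a, b, c, d]

-- ===== PORT A =====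
def canonical_offset_class (D : List Int) (n : Int) : List Int :=
  -- candidates loop: shifted = tuple(sorted((d + t) % n for d in Dset)) for t in range(n)
  let Dset : PySem.Set Int := PySem.Set.ofList D
  let candidates : List (List Int) :=
    (PySem.List.pyRange 0 n 1).map fun t =>
      PySem.List.sorted (Dset.map fun d => PySem.Int.mod (d + t) n) (fun x => x)
  -- Python's min(candidates) raises on []; A only calls this with n ≥ 5, where candidates ≠ []
  (PySem.List.min? candidates (fun x => x)).getD []

def all_distinct_offset_4sets (n : Int) : List (List Int) :=
  ((pyCombinations4 n).foldl
    (fun (st : PySem.Set (List Int) × List (List Int)) combo =>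
      let canon := canonical_offset_class combo n
      if st.1.contains canon then st
      else (st.1.add canon, st.2 ++ [combo]))
    (PySem.Set.empty, [])).2

-- ===== PORT B =====
def all_distinct_offset_4sets_alt (n : Int) : List (List Int) :=
  ((pyCombinations4 n).foldl
    (fun (reps : PySem.Dict (List Int) (List Int)) combo =>
      -- min over the 4 shifts sending one element d of combo to 0; min(<4 tuples>) never raises
      let canon := (PySem.List.min?
        (combo.map fun d =>
          PySem.List.sorted (combo.map fun x => PySem.Int.mod (x - d) n) (fun x => x))
        (fun x => x)).getD []
      if reps.contains canon then reps else reps.insert canon combo)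
    PySem.Dict.empty).values

-- ===== PRECONDITION & SPEC =====
def Spec_all_distinct_offset_4sets (n : Int) (out : List (List Int)) : Prop := out = all_distinct_offset_4sets_alt n
instance (n : Int) (out : List (List Int)) : Decidable (Spec_all_distinct_offset_4sets n out) := by unfold Spec_all_distinct_offset_4sets; infer_instance

-- ===== CLAIM (what is proved, stated in full; the proofs are below) =====
def Claim_equal_all_distinct_offset_4sets : Prop := ∀ (n : Int), Dom_all_distinct_offset_4sets n → Spec_all_distinct_offset_4sets n (all_distinct_offset_4sets n)

-- ===== LEMMAS AND PROOFS =====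

-- B's per-combo canonical form, named for the proofs (definitionally B's inline term)
def altCanon (c : List Int) (n : Int) : List Int :=
  (PySem.List.min?
    (c.map fun d => PySem.List.sorted (c.map fun x => PySem.Int.mod (x - d) n) (fun x => x))
    (fun x => x)).getD []

-- the min?-fold keeps an element no later element beats
theorem minFold_isMin (f : Option (List Int) → List Int → Option (List Int))
    (hf1 : ∀ x, f none x = some x)
    (hf2 : ∀ x m0, (x < m0 ∧ f (some m0) x = some x) ∨ (¬ x < m0 ∧ f (some m0) x = some m0)) :
    ∀ (xs : List (List Int)) (acc : Option (List Int)) (m : List Int),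
      xs.foldl f acc = some m →
      (∀ y ∈ xs, ¬ y < m) ∧ (∀ z, acc = some z → ¬ z < m) := by
  intro xs
  induction xs with
  | nil =>
    intro acc m h; simp at h
    exact ⟨by simp, fun z hz => by rw [h] at hz; cases hz; exact lt_irrefl m⟩
  | cons x xs ih =>
    intro acc m h
    simp only [List.foldl_cons] at h
    obtain ⟨hxs, hacc'⟩ := ih _ m h
    have hstep : ∀ w, f acc x = some w → ¬ x < w ∧ ∀ z, acc = some z → ¬ z < w := by
      intro w hw
      cases acc with
      | none => rw [hf1 x] at hw; cases hw; exact ⟨lt_irrefl x, by simp⟩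
      | some m0 =>
        rcases hf2 x m0 with ⟨hx, he⟩ | ⟨hx, he⟩
        · rw [he] at hw; cases hw
          exact ⟨lt_irrefl x, fun z hz => by cases hz; exact lt_asymm hx⟩
        · rw [he] at hw; cases hw
          exact ⟨hx, fun z hz => by cases hz; exact lt_irrefl w⟩
    obtain ⟨w, hw⟩ : ∃ w, f acc x = some w := by
      cases acc with
      | none => exact ⟨x, hf1 x⟩
      | some m0 => rcases hf2 x m0 with ⟨_, he⟩ | ⟨_, he⟩ <;> exact ⟨_, he⟩
    obtain ⟨hxw, haccw⟩ := hstep w hw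
    have hwm : ¬ w < m := hacc' w hw
    refine ⟨?_, ?_⟩
    · intro y hy
      rcases List.mem_cons.mp hy with rfl | hy'
      · intro hxm
        rcases lt_trichotomy y w with h1 | h1 | h1
        · exact hxw h1
        · exact hwm (h1 ▸ hxm)
        · exact hwm (lt_trans h1 hxm)
      · exact hxs y hy'
    · intro z hz hzm
      have hzw := haccw z hz
      rcases lt_trichotomy w z with h1 | h1 | h1
      · exact hwm (lt_trans h1 hzm)
      · exact hwm (h1 ▸ hzm)
      · exact hzw h1

theorem min?_isMin' {xs : List (List Int)} {m : List Int}
    (h : PySem.List.min? xs (fun x => x) = some m) : ∀ y ∈ xs, ¬ y < m := by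
  unfold PySem.List.min? at h
  refine (minFold_isMin _ (fun x => rfl) (fun x m0 => ?_) xs none m h).1
  by_cases hx : x < m0
  · exact Or.inl ⟨hx, if_pos hx⟩
  · exact Or.inr ⟨hx, if_neg hx⟩

-- min over a list L equals min over a sublist M that lower-bounds all of L
theorem minD_eq (L M : List (List Int)) (hsub : ∀ z ∈ M, z ∈ L) (hne : M ≠ [])
    (hdom : ∀ y ∈ L, ∃ z ∈ M, z = y ∨ z < y) :
    (PySem.List.min? L (fun x => x)).getD [] = (PySem.List.min? M (fun x => x)).getD [] := by
  have hLne : L ≠ [] := by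
    intro hL
    cases M with
    | nil => exact hne rfl
    | cons z zs => exact absurd (hsub z (List.mem_cons_self)) (by simp [hL])
  obtain ⟨mA, hmA⟩ : ∃ mA, PySem.List.min? L (fun x => x) = some mA := by
    cases hA : PySem.List.min? L (fun x => x) with
    | none => exact absurd ((PySem.List.min?_eq_none_iff _ _).mp hA) hLne
    | some v => exact ⟨v, rfl⟩
  obtain ⟨mB, hmB⟩ : ∃ mB, PySem.List.min? M (fun x => x) = some mB := by
    cases hB : PySem.List.min? M (fun x => x) with
    | none => exact absurd ((PySem.List.min?_eq_none_iff _ _).mp hB) hne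
    | some v => exact ⟨v, rfl⟩
  rw [hmA, hmB]
  have hmAmem : mA ∈ L := PySem.List.min?_mem hmA
  have hmBmem : mB ∈ M := PySem.List.min?_mem hmB
  have h1 : ¬ mB < mA := min?_isMin' hmA mB (hsub mB hmBmem)
  obtain ⟨z, hzM, hz⟩ := hdom mA hmAmem
  have h2 : ¬ z < mB := min?_isMin' hmB z hzM
  simp only [Option.getD_some]
  rcases lt_trichotomy mA mB with hlt | heq | hgt
  · rcases hz with rfl | hzlt
    · exact absurd hlt h2
    · exact absurd (lt_trans hzlt hlt) h2
  · exact heq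
  · exact absurd hgt h1

theorem shift_mod (n e x : Int) (hn : 0 < n) :
    PySem.Int.mod (x + (n - e)) n = PySem.Int.mod (x - e) n := by
  rw [PySem.Int.mod_eq_emod_of_pos hn, PySem.Int.mod_eq_emod_of_pos hn]
  have h : x + (n - e) = (x - e) + n * 1 := by ring
  rw [h, Int.add_mul_emod_self_left]

theorem canon_eq {n a b c d : Int} (h1 : 1 ≤ a) (h2 : a < b) (h3 : b < c) (h4 : c < d)
    (h5 : d < n) : canonical_offset_class [a, b, c, d] n = altCanon [a, b, c, d] n := by
  have hn : 0 < n := by omega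
  have hmem : ∀ e ∈ ([a, b, c, d] : List Int), 1 ≤ e ∧ e < n := by
    intro e he
    rcases List.mem_cons.mp he with rfl | he
    · omega
    rcases List.mem_cons.mp he with rfl | he
    · omega
    rcases List.mem_cons.mp he with rfl | he
    · omega
    rcases List.mem_cons.mp he with rfl | he
    · omega
    · simp at he
  have hnodup : ([a, b, c, d] : List Int).Nodup := by
    simp only [List.nodup_cons, List.mem_cons, List.not_mem_nil, List.nodup_nil, not_or,
      and_true, not_false_eq_true]
    omega
  have hofList : PySem.Set.ofList ([a, b, c, d] : List Int) = [a, b, c, d] :=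
    PySem.Set.ofList_eq_self_of_nodup _ hnodup
  -- the two candidate-producing maps agree after the shift substitution t = n - e
  have hcand : ∀ e, PySem.List.sorted (([a, b, c, d] : List Int).map fun x =>
      PySem.Int.mod (x + (n - e)) n) (fun x => x)
      = PySem.List.sorted (([a, b, c, d] : List Int).map fun x =>
      PySem.Int.mod (x - e) n) (fun x => x) := by
    intro e
    have hmc : (([a, b, c, d] : List Int).map fun x => PySem.Int.mod (x + (n - e)) n)
        = ([a, b, c, d] : List Int).map fun x => PySem.Int.mod (x - e) n :=
      List.map_congr_left fun x _ => shift_mod n e x hn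
    rw [hmc]
  unfold canonical_offset_class altCanon
  simp only [hofList]
  apply minD_eq
  · -- every B candidate is an A candidate (at shift t = n - e)
    intro z hz
    obtain ⟨e, he, rfl⟩ := List.mem_map.mp hz
    obtain ⟨he1, he2⟩ := hmem e he
    refine List.mem_map.mpr ⟨n - e, ?_, hcand e⟩
    exact PySem.List.mem_pyRange_one.mpr ⟨by omega, by omega⟩
  · simp
  · -- every A candidate is dominated by some B candidate
    intro y hy
    obtain ⟨t, ht, rfl⟩ := List.mem_map.mp hy
    obtain ⟨ht0, ht1⟩ := PySem.List.mem_pyRange_one.mp ht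
    by_cases h0 : ∃ e ∈ ([a, b, c, d] : List Int), PySem.Int.mod (e + t) n = 0
    · -- some element is shifted to 0: this A candidate IS a B candidate
      obtain ⟨e, he, he0⟩ := h0
      obtain ⟨he1, he2⟩ := hmem e he
      have hte : t = n - e := by
        rw [PySem.Int.mod_eq_emod_of_pos hn] at he0
        have hdvd : n ∣ e + t := Int.dvd_of_emod_eq_zero he0
        have hle : n ≤ e + t := Int.le_of_dvd (by omega) hdvd
        have hdvd2 : n ∣ e + t - n := dvd_sub hdvd dvd_rfl
        have h0' : e + t - n = 0 :=
          Int.eq_zero_of_abs_lt_dvd hdvd2 (by rw [abs_of_nonneg (by omega)]; omega)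
        omega
      refine ⟨PySem.List.sorted (([a, b, c, d] : List Int).map fun x =>
        PySem.Int.mod (x - e) n) (fun x => x), List.mem_map.mpr ⟨e, he, rfl⟩, Or.inl ?_⟩
      rw [← hcand e, hte]
    · -- no element shifted to 0: the B candidate for a starts with 0, the A candidate doesn't
      push Not at h0
      refine ⟨PySem.List.sorted (([a, b, c, d] : List Int).map fun x =>
        PySem.Int.mod (x - a) n) (fun x => x), List.mem_map.mpr ⟨a, by simp, rfl⟩, Or.inr ?_⟩
      have hz0 : (0 : Int) ∈ ([a, b, c, d] : List Int).map fun x => PySem.Int.mod (x - a) n := by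
        refine List.mem_map.mpr ⟨a, by simp, ?_⟩
        rw [PySem.Int.mod_eq_emod_of_pos hn, sub_self, Int.zero_emod]
      cases hzs : PySem.List.sorted (([a, b, c, d] : List Int).map fun x =>
          PySem.Int.mod (x - a) n) (fun x => x) with
      | nil => exact absurd ((PySem.List.sorted_eq_nil_iff _ _ _).mp hzs) (by simp)
      | cons m0 tl0 =>
        cases hys : PySem.List.sorted (([a, b, c, d] : List Int).map fun x =>
            PySem.Int.mod (x + t) n) (fun x => x) with
        | nil => exact absurd ((PySem.List.sorted_eq_nil_iff _ _ _).mp hys) (by simp)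
        | cons m1 tl1 =>
          have hm0le : m0 ≤ 0 := PySem.List.key_head_sorted_le _ _ hzs 0 hz0
          have hm0mem : m0 ∈ ([a, b, c, d] : List Int).map fun x => PySem.Int.mod (x - a) n := by
            rw [← PySem.List.mem_sorted (([a, b, c, d] : List Int).map fun x =>
              PySem.Int.mod (x - a) n) (fun x => x) false m0, hzs]
            exact List.mem_cons_self
          have hm0ge : 0 ≤ m0 := by
            obtain ⟨x, _, rfl⟩ := List.mem_map.mp hm0mem
            rw [PySem.Int.mod_eq_emod_of_pos hn]; exact Int.emod_nonneg _ (by omega)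
          have hm0 : m0 = 0 := le_antisymm hm0le hm0ge
          have hm1mem : m1 ∈ ([a, b, c, d] : List Int).map fun x => PySem.Int.mod (x + t) n := by
            rw [← PySem.List.mem_sorted (([a, b, c, d] : List Int).map fun x =>
              PySem.Int.mod (x + t) n) (fun x => x) false m1, hys]
            exact List.mem_cons_self
          have hm1pos : 0 < m1 := by
            obtain ⟨x, hx, rfl⟩ := List.mem_map.mp hm1mem
            have hne0 := h0 x hx
            rw [PySem.Int.mod_eq_emod_of_pos hn] at hne0 ⊢
            rcases (Int.emod_nonneg (x + t) (show n ≠ 0 by omega)).lt_or_eq with h' | h'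
            · exact h'
            · exact absurd h'.symm hne0
          exact List.Lex.rel (by omega : m0 < m1)

-- the two dedup loops produce the same output list, given pointwise-equal canonical forms
theorem fold_eq (fA fB : List Int → List Int) (l : List (List Int))
    (hf : ∀ c ∈ l, fA c = fB c) :
    ∀ (seen : PySem.Set (List Int)) (out : List (List Int))
      (reps : PySem.Dict (List Int) (List Int)),
      (∀ k, seen.contains k = reps.contains k) → out = reps.values →
      (l.foldl (fun st combo =>
          let canon := fA combo
          if st.1.contains canon then st else (st.1.add canon, st.2 ++ [combo]))
        (seen, out)).2
      = (l.foldl (fun reps combo =>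
          let canon := fB combo
          if reps.contains canon then reps else reps.insert canon combo) reps).values := by
  induction l with
  | nil => intro seen out reps _ h2; simpa using h2
  | cons x l ih =>
    intro seen out reps h1 h2
    simp only [List.foldl_cons]
    rw [hf x List.mem_cons_self]
    by_cases hc : reps.contains (fB x) = true
    · rw [if_pos (by rw [h1 (fB x)]; exact hc), if_pos hc]
      exact ih (fun c hc => hf c (List.mem_cons_of_mem _ hc)) seen out reps h1 h2
    · have hcf : reps.contains (fB x) = false := by simpa using hc
      rw [if_neg (by rw [h1 (fB x), hcf]; simp), if_neg hc]
      apply ih (fun c hc => hf c (List.mem_cons_of_mem _ hc))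
      · intro k
        show (PySem.Set.add seen (fB x)).contains k = _
        rw [PySem.Set.add, if_neg (by rw [h1 (fB x), hcf]; simp)]
        show List.contains _ _ = _
        rw [List.contains_append, PySem.Dict.contains_insert]
        simp only [List.contains_cons, List.contains_nil, Bool.or_false]
        have h1' : List.contains seen k = reps.contains k := h1 k
        rw [h1', Bool.or_comm]
      · show out ++ [x] = _
        rw [h2]
        show _ = PySem.Dict.values _
        unfold PySem.Dict.values
        rw [PySem.Dict.items_insert_of_not_contains _ _ hcf, List.map_append]
        rfl

theorem mem_pyCombinations4 {n : Int} {c : List Int} (h : c ∈ pyCombinations4 n) :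
    ∃ a b c' d, c = [a, b, c', d] ∧ 1 ≤ a ∧ a < b ∧ b < c' ∧ c' < d ∧ d < n := by
  simp only [pyCombinations4, List.mem_flatMap, List.mem_map,
    PySem.List.mem_pyRange_one] at h
  obtain ⟨a, ⟨ha1, _⟩, b, ⟨hb1, _⟩, c', ⟨hc1, _⟩, d, ⟨hd1, hd2⟩, rfl⟩ := h
  exact ⟨a, b, c', d, rfl, ha1, by omega, by omega, by omega, hd2⟩

-- ===== VERDICT (by name: the statement is the Claim_ definition above) =====
theorem all_distinct_offset_4sets_spec : Claim_equal_all_distinct_offset_4sets := by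
  intro n _
  unfold Spec_all_distinct_offset_4sets all_distinct_offset_4sets all_distinct_offset_4sets_alt
  apply fold_eq (fun combo => canonical_offset_class combo n) (fun combo => altCanon combo n)
  · intro c hc
    obtain ⟨a, b, c', d, rfl, h1, h2, h3, h4, h5⟩ := mem_pyCombinations4 hc
    exact canon_eq h1 h2 h3 h4 h5
  · intro k
    show List.contains ([] : List (List Int)) k = _
    rw [PySem.Dict.contains_empty]; rfl
  · rfl
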